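-- pv_equiv track=rewrite | github.com/DrDexter6000/life-index | tools/eval/eval_export.py | qrels_to_trec
-- ===== SOURCE A (Python) =====
-- from collections.abc import Mapping
--
-- def qrels_to_trec(qrels: Mapping[str, Mapping[str, int]]) -> str:
--     """Export qrels to TREC qrels format.
--
--     Line format: ``<query_id> 0 <doc_id> <relevance>``
--     Sorted by query_id asc, doc_id asc.
--     Empty input returns ``""``.
--     """
--     if not qrels:
--         return ""
--
--     lines: list[str] = []
--     for qid in sorted(qrels):
--         inner = qrels[qid]
--         for doc_id in sorted(inner):
--             lines.append(f"{qid} 0 {doc_id} {inner[doc_id]}")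
--     return "\n".join(lines) + "\n"
-- ===== SOURCE B (Python) =====
-- def qrels_to_trec(qrels):
--     """Export qrels to TREC qrels format: one flat table of triples, one sort."""
--     if not qrels:
--         return ""
--     items = [(qid, doc_id, rel)
--              for qid, inner in qrels.items()
--              for doc_id, rel in inner.items()]
--     items.sort(key=lambda t: (t[0], t[1]))
--     return "\n".join(f"{q} 0 {d} {r}" for q, d, r in items) + "\n"
-- ===== Notes on version B (the rewrite author's own statement) =====
-- stated objective: simpler
-- what changed: Replaces the nested per-query sorted loops with one flat list of (qid, doc_id, rel) triples sorted once by the (qid, doc_id) pair and formatted in a single pass.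
import Mathlib
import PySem

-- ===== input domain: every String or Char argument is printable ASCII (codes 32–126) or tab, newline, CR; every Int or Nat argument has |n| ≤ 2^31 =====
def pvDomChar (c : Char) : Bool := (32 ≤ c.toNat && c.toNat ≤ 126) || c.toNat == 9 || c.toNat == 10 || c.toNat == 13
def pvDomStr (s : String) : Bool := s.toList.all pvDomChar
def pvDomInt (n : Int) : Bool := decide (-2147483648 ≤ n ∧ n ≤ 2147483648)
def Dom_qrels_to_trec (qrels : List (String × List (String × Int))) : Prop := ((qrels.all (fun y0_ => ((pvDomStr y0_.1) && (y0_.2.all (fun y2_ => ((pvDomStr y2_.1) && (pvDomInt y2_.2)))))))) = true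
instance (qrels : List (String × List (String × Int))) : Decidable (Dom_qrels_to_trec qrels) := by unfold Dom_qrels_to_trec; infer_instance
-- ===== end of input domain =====

-- B replaces A's nested per-query sorted loops by one flat table of triples sorted once by (qid, doc_id); objective: simpler.

-- ===== PORT A =====
-- the qrels dict (and each inner dict) is the Python dict the assoc list denotes
def qrels_to_trec (qrels : List (String × List (String × Int))) : String :=
  if qrels.isEmpty then "" else
    let d : PySem.Dict String (PySem.Dict String Int) :=
      PySem.Dict.ofList (qrels.map (fun p => (p.1, PySem.Dict.ofList p.2)))
    let lines : List String :=
      (PySem.List.sorted d.keys (fun k => k) false).foldl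
        (fun lines qid =>
          -- inner = qrels[qid]; qid ∈ d.keys so get? is some and the default is unreachable
          let inner := (d.get? qid).getD PySem.Dict.empty
          (PySem.List.sorted inner.keys (fun k => k) false).foldl
            (fun lines doc_id =>
              -- inner[doc_id]; doc_id ∈ inner.keys so the default 0 is unreachable
              lines ++ [qid ++ " 0 " ++ doc_id ++ " " ++ PySem.Int.toStr (inner.getD doc_id 0)])
            lines)
        []
    PySem.Str.join "\n" lines ++ "\n"

-- ===== PORT B =====
def qrels_to_trec_alt (qrels : List (String × List (String × Int))) : String :=
  if qrels.isEmpty then "" else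
    let d : PySem.Dict String (PySem.Dict String Int) :=
      PySem.Dict.ofList (qrels.map (fun p => (p.1, PySem.Dict.ofList p.2)))
    let items : List (String × String × Int) :=
      d.items.flatMap (fun p => p.2.items.map (fun dr => (p.1, dr)))
    let sortedItems := PySem.List.sorted2 items (fun t => t.1) (fun t => t.2.1) false
    PySem.Str.join "\n"
      (sortedItems.map (fun t => t.1 ++ " 0 " ++ t.2.1 ++ " " ++ PySem.Int.toStr t.2.2)) ++ "\n"

-- ===== PRECONDITION & SPEC =====
def Spec_qrels_to_trec (qrels : List (String × List (String × Int))) (out : String) : Prop := out = qrels_to_trec_alt qrels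
instance (qrels : List (String × List (String × Int))) (out : String) : Decidable (Spec_qrels_to_trec qrels out) := by unfold Spec_qrels_to_trec; infer_instance

-- ===== CLAIM (what is proved, stated in full; the proofs are below) =====
def Claim_equal_qrels_to_trec : Prop := ∀ (qrels : List (String × List (String × Int))), Dom_qrels_to_trec qrels → Spec_qrels_to_trec qrels (qrels_to_trec qrels)

-- ===== LEMMAS AND PROOFS =====

theorem sorted_nodup_pairwise_lt {κ : Type} [LinearOrder κ] (l : List κ) (h : l.Nodup) :
    (PySem.List.sorted l (fun k => k) false).Pairwise (· < ·) := by
  have hle := PySem.List.sorted_pairwise l (fun k => k)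
  have hnd : (PySem.List.sorted l (fun k => k) false).Nodup :=
    (PySem.List.sorted_perm l (fun k => k) false).nodup_iff.mpr h
  exact (hle.and (List.Pairwise.imp (fun hne => hne) hnd)).imp (fun ⟨h1, h2⟩ => lt_of_le_of_ne h1 h2)

theorem values_update_sub {κ ν : Type} [BEq κ] [LawfulBEq κ] (ps : List (κ × ν)) (d : PySem.Dict κ ν)
    (v : ν) (hv : v ∈ (d.update ps).values) : v ∈ d.values ∨ ∃ p ∈ ps, v = p.2 := by
  induction ps generalizing d with
  | nil => exact Or.inl hv
  | cons p t ih =>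
    have hv' : v ∈ ((d.insert p.1 p.2).update t).values := by
      simpa [PySem.Dict.update] using hv
    rcases ih (d.insert p.1 p.2) hv' with h | h
    · rcases PySem.Dict.mem_values_insert d p.1 p.2 v h with h | h
      · exact Or.inr ⟨p, by simp, h⟩
      · exact Or.inl h
    · obtain ⟨q, hq, he⟩ := h
      exact Or.inr ⟨q, by simp [hq], he⟩

theorem values_ofList_map {α κ ν : Type} [BEq κ] [LawfulBEq κ] (f : α → κ × ν) (l : List α)
    (v : ν) (hv : v ∈ (PySem.Dict.ofList (l.map f)).values) : ∃ a ∈ l, v = (f a).2 := by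
  rcases values_update_sub (l.map f) PySem.Dict.empty v hv with h | h
  · simp [PySem.Dict.values, PySem.Dict.empty] at h
  · obtain ⟨p, hp, he⟩ := h
    obtain ⟨a, ha, rfl⟩ := List.mem_map.mp hp
    exact ⟨a, ha, he⟩

theorem sorted2_eq_sorted_toLex {α κ₁ κ₂ : Type} [LinearOrder κ₁] [LinearOrder κ₂]
    (xs : List α) (k1 : α → κ₁) (k2 : α → κ₂) :
    PySem.List.sorted2 xs k1 k2 false = PySem.List.sorted xs (fun x => toLex (k1 x, k2 x)) false := by
  unfold PySem.List.sorted2 PySem.List.sorted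
  simp only [Bool.false_eq_true, if_false]
  congr 1
  funext acc x
  congr 1
  funext a b
  simp only [Prod.Lex.toLex_lt_toLex]
  rcases lt_trichotomy (k1 a) (k1 b) with h | h | h
  · simp [h, not_lt_of_gt h]
  · simp [h]
  · simp [h, not_lt_of_gt h, ne_of_gt h]


theorem ports_agree (qrels : List (String × List (String × Int))) :
    qrels_to_trec qrels = qrels_to_trec_alt qrels := by
  by_cases hq : qrels.isEmpty
  · simp [qrels_to_trec, qrels_to_trec_alt, hq]
  · unfold qrels_to_trec qrels_to_trec_alt
    simp only [hq]
    set d := PySem.Dict.ofList (qrels.map (fun p => (p.1, PySem.Dict.ofList p.2))) with hd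
    set g : String → PySem.Dict String Int := fun qid => (d.get? qid).getD PySem.Dict.empty with hg
    have hdk : d.keys.Nodup := PySem.Dict.nodup_keys_ofList _
    have hinner : ∀ qid, (g qid).keys.Nodup := by
      intro qid
      cases hgq : d.get? qid with
      | none => simp [hg, hgq, PySem.Dict.empty, PySem.Dict.keys]
      | some v =>
        have hvmem : v ∈ d.values :=
          List.mem_map_of_mem (PySem.Dict.mem_items_of_get?_eq_some d hgq)
        obtain ⟨a, _, rfl⟩ := values_ofList_map (fun p => (p.1, PySem.Dict.ofList p.2)) qrels v hvmem
        simp only [hg, hgq, Option.getD_some]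
        exact PySem.Dict.nodup_keys_ofList _
    -- A's lines as a flatMap
    simp only [PySem.List.foldl_append_singleton_eq_map, PySem.List.foldl_append_eq_flatMap,
      List.nil_append]
    -- B's sorted2 as sorted with the lex key
    rw [sorted2_eq_sorted_toLex]
    -- name the sorted order
    have hTS : PySem.List.sorted
        (d.items.flatMap (fun p => p.2.items.map (fun dr => (p.1, dr))))
        (fun t : String × String × Int => toLex (t.1, t.2.1)) false
        = (PySem.List.sorted d.keys (fun k => k) false).flatMap
            (fun qid => (PySem.List.sorted (g qid).keys (fun k => k) false).map
              (fun doc => (qid, doc, (g qid).getD doc 0))) := by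
      apply PySem.List.sorted_eq_of_perm_of_pairwise_lt
      · -- permutation
        have hitems : d.items = d.keys.map (fun k => (k, (d.get? k).getD PySem.Dict.empty)) := by
          rw [PySem.Dict.items_eq_map_keys d hdk PySem.Dict.empty]
          refine List.map_congr_left (fun k hk => ?_)
          rw [PySem.Dict.getD_eq_get?_getD]
        rw [hitems, List.flatMap_map]
        refine List.Perm.flatMap (PySem.List.sorted_perm d.keys (fun k => k) false) ?_
        intro k hk
        have hik : (g k).items = (g k).keys.map (fun doc => (doc, (g k).getD doc 0)) :=
          PySem.Dict.items_eq_map_keys (g k) (hinner k) 0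
        rw [hik, List.map_map]
        exact ((PySem.List.sorted_perm (g k).keys (fun x => x) false).map _)
      · -- strictly increasing in the lex key
        refine List.pairwise_flatMap.mpr ⟨?_, ?_⟩
        · intro k hk
          rw [List.pairwise_map]
          refine (sorted_nodup_pairwise_lt (g k).keys (hinner k)).imp ?_
          intro a b hab
          exact Prod.Lex.toLex_lt_toLex.mpr (Or.inr ⟨rfl, hab⟩)
        · refine (sorted_nodup_pairwise_lt d.keys hdk).imp ?_
          intro k1 k2 h12 x hx y hy
          obtain ⟨_, _, rfl⟩ := List.mem_map.mp hx
          obtain ⟨_, _, rfl⟩ := List.mem_map.mp hy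
          exact Prod.Lex.toLex_lt_toLex.mpr (Or.inl h12)
    rw [hTS, List.map_flatMap]
    simp only [List.map_map]
    rfl

-- ===== VERDICT (by name: the statement is the Claim_ definition above) =====
theorem qrels_to_trec_spec : Claim_equal_qrels_to_trec := by
  intro qrels _
  exact ports_agree qrels
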